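-- pv_equiv track=rewrite | github.com/giuliop/AdvenfOfCode2023 | python/day1.py | number_indexes
-- ===== SOURCE A (Python) =====
-- NUMBERS = [1, 2, 3, 4, 5, 6, 7, 8, 9, 0]
--
-- def number_indexes(line):
--     # return a dictionsy of all the positions of the numbers in NUMBERS
--     # in line, e.g., {1: [0, 4], 2: [1]}
--     indexes = {}
--     for number in NUMBERS:
--         index = line.find(str(number))
--         if index == -1:
--             continue
--         indexes[number] = []
--         while index != -1:
--             indexes[number].append(index)
--             index = line.find(str(number), index + 1)
--     return indexes
-- ===== SOURCE B (Python) =====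
-- NUMBERS = [1, 2, 3, 4, 5, 6, 7, 8, 9, 0]
--
-- def number_indexes(line):
--     # one left-to-right pass: collect positions per digit, then emit in NUMBERS key order
--     seen = {}
--     for i, ch in enumerate(line):
--         if ch in '0123456789':
--             seen.setdefault(int(ch), []).append(i)
--     res = {}
--     for n in NUMBERS:
--         if n in seen:
--             res[n] = seen[n]
--     return res
-- ===== Notes on version B (the rewrite author's own statement) =====
-- stated objective: alternative
-- what changed: A scans the line from scratch for each of the 10 digits with repeated str.find calls; B makes one enumerate pass over the line collecting positions per digit into a dict, then assembles the result in NUMBERS key order (single traversal instead of per-digit rescans, though A's C-level find is faster in CPython).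
import Mathlib
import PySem

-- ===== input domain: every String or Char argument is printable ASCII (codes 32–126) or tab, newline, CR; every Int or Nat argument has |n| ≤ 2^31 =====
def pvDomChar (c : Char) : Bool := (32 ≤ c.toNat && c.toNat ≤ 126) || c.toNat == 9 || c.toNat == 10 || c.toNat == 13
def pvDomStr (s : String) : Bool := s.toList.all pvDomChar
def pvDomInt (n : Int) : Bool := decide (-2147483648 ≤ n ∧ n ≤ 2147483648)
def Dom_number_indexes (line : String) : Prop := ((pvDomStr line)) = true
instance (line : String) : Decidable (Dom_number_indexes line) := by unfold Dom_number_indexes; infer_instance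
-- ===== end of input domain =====

-- B replaces A's per-digit repeated line.find scans by ONE enumerate pass collecting all
-- positions per digit, then assembles the result in NUMBERS key order (objective: alternative
-- single-traversal algorithm; not claimed faster).

-- module constant shared by both versions
def NUMBERS : List Int := [1, 2, 3, 4, 5, 6, 7, 8, 9, 0]

-- ===== PORT A =====
-- A's 'while index != -1' loop; the in-place append to indexes[number] is ported as the
-- accumulator acc, and fuel = len(line)+1 is a totality guard only (each iteration's next
-- find starts strictly past the previous hit, so the loop runs at most len(line) times).
def pvFindAll (cs ds : List Char) : Nat → Int → List Int → List Int
  | 0, _, acc => acc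
  | fuel + 1, index, acc =>
      if index = -1 then acc
      else pvFindAll cs ds fuel (PySem.Chars.findFrom cs ds (index + 1)) (acc ++ [index])

def number_indexes (line : String) : List (Int × List Int) :=
  (NUMBERS.foldl (fun (indexes : PySem.Dict Int (List Int)) number =>
      let index := PySem.Chars.find line.toList (PySem.Int.toChars number)
      if index = -1 then indexes
      else indexes.insert number
        (pvFindAll line.toList (PySem.Int.toChars number) (line.toList.length + 1) index []))
    PySem.Dict.empty).items

-- ===== PORT B =====
def pvDigits : List Char := ['0', '1', '2', '3', '4', '5', '6', '7', '8', '9']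

-- int(ch) for a single character; B only calls it under the guard ch ∈ '0123456789',
-- where ofChars? is some, so the .getD 0 default is never used
def pvInt (c : Char) : Int := (PySem.Int.ofChars? [c]).getD 0

def number_indexes_alt (line : String) : List (Int × List Int) :=
  let seen := (PySem.List.enumerate line.toList 0).foldl
    (fun (seen : PySem.Dict Int (List Int)) p =>
      if PySem.Chars.isIn [p.2] pvDigits then
        -- seen.setdefault(int(ch), []).append(i)
        seen.modify (pvInt p.2) [] (· ++ [p.1])
      else seen)
    PySem.Dict.empty
  -- res[n] = seen[n], guarded by 'n in seen', so getD's default is never used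
  (NUMBERS.foldl (fun (res : PySem.Dict Int (List Int)) n =>
      if seen.contains n then res.insert n (seen.getD n []) else res)
    PySem.Dict.empty).items

-- ===== PRECONDITION & SPEC =====
def Spec_number_indexes (line : String) (out : List (Int × List Int)) : Prop := out = number_indexes_alt line
instance (line : String) (out : List (Int × List Int)) : Decidable (Spec_number_indexes line out) := by unfold Spec_number_indexes; infer_instance

-- ===== CLAIM (what is proved, stated in full; the proofs are below) =====
def Claim_equal_number_indexes : Prop := ∀ (line : String), Dom_number_indexes line → Spec_number_indexes line (number_indexes line)

-- ===== LEMMAS AND PROOFS =====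

theorem pvIsIn_singleton (x : Char) (l : List Char) :
    PySem.Chars.isIn [x] l = true ↔ x ∈ l := by
  rw [PySem.Chars.isIn_iff_infix, List.singleton_infix_iff]

-- the ascending list of positions (offset k) of character c in a list
def pvOcc (c : Char) : List Char → Int → List Int
  | [], _ => []
  | x :: t, k => if x = c then k :: pvOcc c t (k + 1) else pvOcc c t (k + 1)

theorem pvOcc_of_not_mem (c : Char) : ∀ (l : List Char) (k : Int), c ∉ l → pvOcc c l k = []
  | [], _, _ => rfl
  | x :: t, k, h => by
      simp only [List.mem_cons, not_or] at h
      rw [pvOcc, if_neg (fun hh => h.1 hh.symm), pvOcc_of_not_mem c t (k + 1) h.2]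

theorem pvOcc_first (c : Char) : ∀ (j : Nat) (l : List Char) (k : Int)
    (hj : j < l.length), (∀ i, i < j → ∀ (h : i < l.length), l[i] ≠ c) → l[j] = c →
    pvOcc c l k = (k + j) :: pvOcc c (l.drop (j + 1)) (k + j + 1) := by
  intro j
  induction j with
  | zero =>
      intro l k hj _ hget
      match l, hj with
      | x :: t, _ =>
        simp only [List.getElem_cons_zero] at hget
        simp [pvOcc, hget]
  | succ j ih =>
      intro l k hj hmin hget
      match l, hj with
      | x :: t, hj =>
        have hx : x ≠ c := by
          have := hmin 0 (Nat.succ_pos j) (by simp)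
          simpa using this
        have ht : pvOcc c t (k + 1) = (k + 1 + j) :: pvOcc c (t.drop (j + 1)) (k + 1 + j + 1) := by
          apply ih t (k + 1) (by simpa using Nat.lt_of_succ_lt_succ hj)
          · intro i hi h
            have := hmin (i + 1) (Nat.succ_lt_succ hi) (by simpa using Nat.succ_lt_succ h)
            simpa using this
          · simpa using hget
        rw [pvOcc, if_neg hx, ht]
        have h1 : (k + 1 + (j : Int)) = k + ((j : Nat) + 1 : Nat) := by push_cast; ring
        rw [h1]
        simp [List.drop_succ_cons]

theorem pvFindAll_eq (cs : List Char) (c : Char) :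
    ∀ (fuel k : Nat) (acc : List Int), k ≤ cs.length → cs.length - k < fuel →
      pvFindAll cs [c] fuel (PySem.Chars.findFrom cs [c] (k : Int)) acc
        = acc ++ pvOcc c (cs.drop k) (k : Int) := by
  intro fuel
  induction fuel with
  | zero => intro k acc hk hfuel; omega
  | succ fuel ih =>
    intro k acc hk hfuel
    rw [PySem.Chars.findFrom_natCast cs [c] k hk]
    by_cases hfind : PySem.Chars.find (cs.drop k) [c] = -1
    · rw [if_pos hfind]
      have hmem : c ∉ cs.drop k := by
        have := (PySem.Chars.find_eq_neg_one_iff (cs.drop k) [c]).1 hfind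
        rw [List.singleton_infix_iff] at this
        exact this
      rw [pvOcc_of_not_mem c _ _ hmem]
      simp [pvFindAll]
    · rw [if_neg hfind]
      set j := PySem.Chars.find (cs.drop k) [c] with hjdef
      have hj0 : 0 ≤ j := by
        have := PySem.Chars.neg_one_le_find (cs.drop k) [c]; omega
      obtain ⟨hpre, hmin⟩ := PySem.Chars.find_spec (s := cs.drop k) (sub := [c]) hj0
      have hhead : ((cs.drop k).drop j.toNat).head? = some c := by
        obtain ⟨t, ht⟩ := hpre
        rw [← ht]; rfl
      rw [List.head?_drop] at hhead
      obtain ⟨hjlt, hjget⟩ := List.getElem?_eq_some_iff.1 hhead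
      have hjlen : j.toNat < cs.length - k := by
        simpa [List.length_drop] using hjlt
      -- one step of the while loop
      have hne : ¬ ((k : Int) + j = -1) := by omega
      rw [pvFindAll, if_neg hne]
      have hcast : ((k : Int) + j + 1) = ((k + j.toNat + 1 : Nat) : Int) := by
        push_cast; omega
      rw [hcast, ih (k + j.toNat + 1) (acc ++ [(k : Int) + j]) (by omega) (by omega)]
      -- fold the first occurrence into pvOcc of the suffix
      have hfirst := pvOcc_first c j.toNat (cs.drop k) (k : Int) hjlt
        (fun i hi h => by
          have := hmin i (by omega)
          intro hc
          refine this ⟨(cs.drop k).drop (i + 1), ?_⟩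
          rw [← hc]
          exact List.getElem_cons_drop ..)
        hjget
      rw [List.drop_drop, show k + (j.toNat + 1) = k + j.toNat + 1 from by omega] at hfirst
      rw [hfirst]
      have hkj : ((k : Int) + j) = (k : Int) + (j.toNat : Int) := by omega
      have hkj1 : ((k + j.toNat + 1 : Nat) : Int) = (k : Int) + (j.toNat : Int) + 1 := by
        push_cast; ring
      rw [hkj1, hkj]
      simp

theorem pvOcc_enum (c : Char) : ∀ (l : List Char) (k : Int),
    ((PySem.List.enumerate l k).filter (fun p => p.2 == c)).map (fun p => p.1) = pvOcc c l k
  | [], k => by simp [PySem.List.enumerate_nil, pvOcc]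
  | x :: t, k => by
      rw [PySem.List.enumerate_cons]
      by_cases hx : x = c <;>
        simp [pvOcc, hx, pvOcc_enum c t (k + 1)]

theorem pvPass_eq : ∀ (l : List (Int × Char)) (d : PySem.Dict Int (List Int)),
    l.foldl (fun seen p =>
        if PySem.Chars.isIn [p.2] pvDigits then seen.modify (pvInt p.2) [] (· ++ [p.1]) else seen) d
      = ((l.filter (fun p => PySem.Chars.isIn [p.2] pvDigits)).map (fun p => (pvInt p.2, p.1))).foldl
          (fun d q => d.modify q.1 [] (· ++ [q.2])) d
  | [], d => rfl
  | p :: t, d => by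
      by_cases hp : PySem.Chars.isIn [p.2] pvDigits <;>
        simp [hp, pvPass_eq t]

theorem pvMkHc (n : Int) (c : Char) (h1 : c ∈ pvDigits ∧ pvInt c = n)
    (h2 : pvDigits.all (fun x => pvInt x != n || x == c) = true) :
    ∀ x : Char, (PySem.Chars.isIn [x] pvDigits = true ∧ pvInt x = n) ↔ x = c := by
  intro x
  rw [pvIsIn_singleton]
  constructor
  · rintro ⟨hm, hv⟩
    have hx := List.all_eq_true.1 h2 x hm
    simpa [hv] using hx
  · rintro rfl; exact h1

theorem pvStep_eq (cs : List Char) (n : Int) (c : Char)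
    (Ht : PySem.Int.toChars n = [c])
    (Hc : ∀ x : Char, (PySem.Chars.isIn [x] pvDigits = true ∧ pvInt x = n) ↔ x = c)
    (d : PySem.Dict Int (List Int)) :
    (let index := PySem.Chars.find cs (PySem.Int.toChars n)
     if index = -1 then d
     else d.insert n (pvFindAll cs (PySem.Int.toChars n) (cs.length + 1) index []))
    = (let seen := (PySem.List.enumerate cs 0).foldl
        (fun (seen : PySem.Dict Int (List Int)) p =>
          if PySem.Chars.isIn [p.2] pvDigits then seen.modify (pvInt p.2) [] (· ++ [p.1]) else seen)
        PySem.Dict.empty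
       if seen.contains n then d.insert n (seen.getD n []) else d) := by
  dsimp only
  rw [Ht, pvPass_eq (PySem.List.enumerate cs 0) PySem.Dict.empty]
  have hpred : (fun p : Int × Char => (pvInt p.2 == n) && PySem.Chars.isIn [p.2] pvDigits)
      = (fun p : Int × Char => p.2 == c) := by
    funext p
    by_cases hpc : p.2 = c
    · obtain ⟨h1, h2⟩ := (Hc p.2).2 hpc
      rw [hpc] at h1 h2
      simp [hpc, h1, h2]
    · have hr : (p.2 == c) = false := by simpa using hpc
      rw [hr, Bool.and_eq_false_iff]
      by_cases hg : PySem.Chars.isIn [p.2] pvDigits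
      · exact Or.inl (by simpa using fun hv => hpc ((Hc p.2).1 ⟨hg, hv⟩))
      · exact Or.inr (by simpa using hg)
  have hgetD : (((((PySem.List.enumerate cs 0).filter
          (fun p => PySem.Chars.isIn [p.2] pvDigits)).map
          (fun p => (pvInt p.2, p.1))).foldl
          (fun d q => d.modify q.1 [] (· ++ [q.2])) PySem.Dict.empty)).getD n []
      = pvOcc c cs 0 := by
    rw [PySem.Dict.getD_foldl_modify_append, PySem.Dict.getD_empty,
      List.filter_map, List.filter_filter]
    simp only [Function.comp]
    rw [hpred, List.map_map]
    simpa using pvOcc_enum c cs 0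
  have hkeys := PySem.Dict.keys_foldl_modify_key
    ((((PySem.List.enumerate cs 0).filter
        (fun p => PySem.Chars.isIn [p.2] pvDigits)).map
        (fun p => (pvInt p.2, p.1)))) Prod.fst ([] : List Int)
    (fun _ q => (· ++ [q.2])) PySem.Dict.empty
  have hmemiff : c ∈ cs ↔ ∃ p ∈ PySem.List.enumerate cs 0, p.2 = c := by
    rw [List.mem_iff_getElem]
    constructor
    · rintro ⟨i, hi, hgi⟩
      exact ⟨(0 + (i : Int), cs[i]), (PySem.List.mem_enumerate_iff ..).2 ⟨i, hi, rfl⟩, hgi⟩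
    · rintro ⟨p, hp, hpc⟩
      obtain ⟨k, hk, rfl⟩ := (PySem.List.mem_enumerate_iff ..).1 hp
      exact ⟨k, hk, hpc⟩
  have hcontains : (((((PySem.List.enumerate cs 0).filter
          (fun p => PySem.Chars.isIn [p.2] pvDigits)).map
          (fun p => (pvInt p.2, p.1))).foldl
          (fun d q => d.modify q.1 [] (· ++ [q.2])) PySem.Dict.empty)).contains n = true
      ↔ c ∈ cs := by
    rw [PySem.Dict.contains_iff_mem_keys, hkeys, PySem.Set.mem_update]
    simp only [PySem.Dict.keys_empty, List.not_mem_nil, false_or, List.map_map,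
      List.mem_map, List.mem_filter, Function.comp]
    constructor
    · rintro ⟨p, ⟨hpmem, hpg⟩, hpv⟩
      exact hmemiff.2 ⟨p, hpmem, (Hc p.2).1 ⟨hpg, hpv⟩⟩
    · intro hc
      obtain ⟨p, hpmem, hpc⟩ := hmemiff.1 hc
      obtain ⟨h1, h2⟩ := (Hc p.2).2 hpc
      exact ⟨p, ⟨hpmem, h1⟩, h2⟩
  have hfind : PySem.Chars.find cs [c] = -1 ↔ c ∉ cs := by
    rw [PySem.Chars.find_eq_neg_one_iff, List.singleton_infix_iff]
  have hall : pvFindAll cs [c] (cs.length + 1) (PySem.Chars.find cs [c]) [] = pvOcc c cs 0 := by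
    have h0 := pvFindAll_eq cs c (cs.length + 1) 0 [] (Nat.zero_le _) (by omega)
    simpa using h0
  by_cases hc : c ∈ cs
  · rw [if_neg (fun h => (hfind.1 h) hc), if_pos (hcontains.2 hc), hgetD, hall]
  · rw [if_pos (hfind.2 hc), if_neg (fun h => hc (hcontains.1 h))]

-- ===== VERDICT (by name: the statement is the Claim_ definition above) =====
set_option maxRecDepth 8192 in
theorem number_indexes_spec : Claim_equal_number_indexes := by
  intro line _
  unfold Spec_number_indexes number_indexes number_indexes_alt
  congr 1
  refine PySem.List.foldl_congr_mem _ _ _ _ ?_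
  intro d n hn
  simp only [NUMBERS, List.mem_cons, List.not_mem_nil, or_false] at hn
  rcases hn with rfl | rfl | rfl | rfl | rfl | rfl | rfl | rfl | rfl | rfl
  · exact pvStep_eq line.toList 1 '1' (by decide) (pvMkHc _ _ ⟨by decide, by decide⟩ (by decide)) d
  · exact pvStep_eq line.toList 2 '2' (by decide) (pvMkHc _ _ ⟨by decide, by decide⟩ (by decide)) d
  · exact pvStep_eq line.toList 3 '3' (by decide) (pvMkHc _ _ ⟨by decide, by decide⟩ (by decide)) d
  · exact pvStep_eq line.toList 4 '4' (by decide) (pvMkHc _ _ ⟨by decide, by decide⟩ (by decide)) d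
  · exact pvStep_eq line.toList 5 '5' (by decide) (pvMkHc _ _ ⟨by decide, by decide⟩ (by decide)) d
  · exact pvStep_eq line.toList 6 '6' (by decide) (pvMkHc _ _ ⟨by decide, by decide⟩ (by decide)) d
  · exact pvStep_eq line.toList 7 '7' (by decide) (pvMkHc _ _ ⟨by decide, by decide⟩ (by decide)) d
  · exact pvStep_eq line.toList 8 '8' (by decide) (pvMkHc _ _ ⟨by decide, by decide⟩ (by decide)) d
  · exact pvStep_eq line.toList 9 '9' (by decide) (pvMkHc _ _ ⟨by decide, by decide⟩ (by decide)) d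
  · exact pvStep_eq line.toList 0 '0' (by decide) (pvMkHc _ _ ⟨by decide, by decide⟩ (by decide)) d
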